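-- pv_equiv track=rewrite | github.com/wyyadd/practice | python_programme/09019203汪跃阳/Pythontask2.py | make_subtract
-- ===== SOURCE A (Python) =====
-- import copy
--
-- def make_subtract(list_temp1, list_temp2):  # 用包含所有同学的列表减去已经点名过的同学的列表
--     list_temp0 = copy.deepcopy(list_temp1)  # 深拷贝, 便于后续需操作(可删去)
--     list_num = []  # 创建一个列表,记录需要删除的位置
--     for i0 in range(len(list_temp0)):
--         for j0 in range(len(list_temp2)):
--             if list_temp0[i0][0] == list_temp2[j0][0]:
--                 list_num.append(i0)  # 记录列表中哪个文件需要删除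
--                 continue
--     list_num.sort(reverse=True)
--     for i1 in list_num:
--         del list_temp0[i1]  # 删除
--     return list_temp0  # 返回点名列表
-- ===== SOURCE B (Python) =====
-- def make_subtract(list_temp1, list_temp2):  # set of named ids, one filtering pass
--     named = {row[0] for row in list_temp2}
--     return [row for row in list_temp1 if row[0] not in named]
-- ===== Notes on version B (the rewrite author's own statement) =====
-- stated objective: faster
-- what changed: Replaces the quadratic nested index loops plus descending-index deletion pass with a hash set of list_temp2's first fields and a single filtering pass over list_temp1.
-- outside the precondition, e.g. on make_subtract([['a'], ['b'], ['c']], [['a'], ['a']]): A returns [['c']], B returns [['b'], ['c']]; on make_subtract([[]], []): A returns [[]], B raises IndexError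
import Mathlib
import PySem

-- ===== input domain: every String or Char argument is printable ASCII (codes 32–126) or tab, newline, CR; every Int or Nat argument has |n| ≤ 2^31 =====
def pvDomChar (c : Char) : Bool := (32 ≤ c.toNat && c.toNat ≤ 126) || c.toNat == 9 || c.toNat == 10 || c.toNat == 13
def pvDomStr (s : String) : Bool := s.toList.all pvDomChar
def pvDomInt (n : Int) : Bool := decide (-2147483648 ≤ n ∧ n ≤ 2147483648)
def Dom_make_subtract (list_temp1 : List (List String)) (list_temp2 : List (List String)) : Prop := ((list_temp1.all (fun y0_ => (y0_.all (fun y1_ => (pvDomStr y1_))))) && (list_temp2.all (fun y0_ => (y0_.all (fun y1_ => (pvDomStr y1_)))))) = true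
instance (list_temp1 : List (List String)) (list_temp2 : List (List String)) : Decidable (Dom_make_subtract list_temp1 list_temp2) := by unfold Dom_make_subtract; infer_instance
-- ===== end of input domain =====

-- B replaces A's quadratic nested index loops + descending-deletion pass with a set of
-- list_temp2's first fields and one filtering pass (objective: faster, asymptotic).
-- Equivalence is about the RETURN value; A returns a deep copy, neither mutates its arguments.

-- ===== PORT A =====
def make_subtract (list_temp1 : List (List String)) (list_temp2 : List (List String)) : List (List String) :=
  let list_temp0 := list_temp1   -- deepcopy: same value
  let list_num : List Int :=
    (PySem.List.pyRange 0 (PySem.List.len list_temp0) 1).foldl (fun acc i0 =>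
      (PySem.List.pyRange 0 (PySem.List.len list_temp2) 1).foldl (fun acc2 j0 =>
        if ((PySem.List.pyGet? list_temp0 i0).bind (fun r => PySem.List.pyGet? r 0))
            == ((PySem.List.pyGet? list_temp2 j0).bind (fun r => PySem.List.pyGet? r 0))
        then acc2 ++ [i0] else acc2) acc) []
  let sorted_num := PySem.List.sorted list_num (fun x => x) true
  sorted_num.foldl (fun cur i1 =>
    match PySem.List.pop? cur i1 with
    | some r => r.2
    | none => cur) list_temp0

-- ===== PORT B =====
def make_subtract_alt (list_temp1 : List (List String)) (list_temp2 : List (List String)) : List (List String) :=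
  let named : PySem.Set (Option String) :=
    PySem.Set.ofList (list_temp2.map (fun row => PySem.List.pyGet? row 0))
  list_temp1.filter (fun row => !(PySem.Set.contains named (PySem.List.pyGet? row 0)))

-- ===== PRECONDITION & SPEC =====
-- Pre_ excludes inputs where a record is the empty list (row[0] raises IndexError) and inputs
-- where some record of list_temp1 has a first field matching two or more records of list_temp2:
-- there A appends the same deletion index repeatedly, so its descending deletion pass deletes
-- unrelated records (or raises IndexError), an accident of A's implementation no caller could want.
def Pre_make_subtract (list_temp1 : List (List String)) (list_temp2 : List (List String)) : Prop :=
  (∀ r ∈ list_temp1, r ≠ []) ∧ (∀ r ∈ list_temp2, r ≠ []) ∧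
  (∀ r ∈ list_temp1, list_temp2.countP (fun s => s.head? == r.head?) ≤ 1)
instance (list_temp1 : List (List String)) (list_temp2 : List (List String)) : Decidable (Pre_make_subtract list_temp1 list_temp2) := by unfold Pre_make_subtract; infer_instance

def pvWitness_make_subtract : List (List String) × List (List String) :=
  ([["1", "ann"], ["2", "bob"], ["3", "cid"]], [["2", "bob"]])

def Spec_make_subtract (list_temp1 : List (List String)) (list_temp2 : List (List String)) (out : List (List String)) : Prop := out = make_subtract_alt list_temp1 list_temp2
instance (list_temp1 : List (List String)) (list_temp2 : List (List String)) (out : List (List String)) : Decidable (Spec_make_subtract list_temp1 list_temp2 out) := by unfold Spec_make_subtract; infer_instance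

-- ===== CLAIM (what is proved, stated in full; the proofs are below) =====
def Claim_equal_make_subtract : Prop := ∀ (list_temp1 : List (List String)) (list_temp2 : List (List String)), Dom_make_subtract list_temp1 list_temp2 → Pre_make_subtract list_temp1 list_temp2 → Spec_make_subtract list_temp1 list_temp2 (make_subtract list_temp1 list_temp2)

-- ===== LEMMAS AND PROOFS =====

-- the deletion step 'del cur[i1]' of port A, as a named function (definitionally the port's fold body)
def pvDel {α : Type} (cur : List α) (i : Int) : List α :=
  match PySem.List.pop? cur i with
  | some r => r.2
  | none => cur

theorem pvDel_natCast {α : Type} (cur : List α) (k : Nat) (h : k < cur.length) :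
    pvDel cur (k : Int) = cur.eraseIdx k := by
  unfold pvDel; rw [PySem.List.pop?_natCast cur k h]

-- row[0] is head?
theorem pvKey0 (r : List String) : PySem.List.pyGet? r 0 = r.head? := by
  cases r <;> simp [pysem]

-- deleting a strictly descending list of indices all below l.length only touches the prefix
theorem pvDelFold_prefix {α : Type} (ds : List Nat) (t : List α) :
    ∀ l : List α, ds.Pairwise (· > ·) → (∀ d ∈ ds, d < l.length) →
    ds.foldl (fun cur (k : Nat) => pvDel cur (k : Int)) (l ++ t)
      = (ds.foldl (fun cur (k : Nat) => pvDel cur (k : Int)) l) ++ t := by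
  induction ds with
  | nil => intro l _ _; rfl
  | cons d ds ih =>
      intro l hp hb
      rcases List.pairwise_cons.mp hp with ⟨hd, hp'⟩
      have hdl : d < l.length := hb d (by simp)
      simp only [List.foldl_cons]
      rw [pvDel_natCast (l ++ t) d (by simp; omega), pvDel_natCast l d hdl,
          List.eraseIdx_append_of_lt_length hdl t]
      exact ih (l.eraseIdx d) hp' (by
        intro e he
        have h1 : e < d := hd e he
        rw [List.length_eraseIdx_of_lt hdl]; omega)

-- the descending deletion pass over the indices of range(len l) satisfying p keeps
-- exactly the positions where p fails
theorem pvDelFold_main {α : Type} (l : List α) (p : Nat → Bool) :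
    (((List.range l.length).filter p).reverse).foldl (fun cur (k : Nat) => pvDel cur (k : Int)) l
      = (l.zipIdx.filter (fun z => !(p z.2))).map Prod.fst := by
  induction l using List.reverseRecOn with
  | nil => rfl
  | append_singleton l' a ih =>
      have hL : (l' ++ [a]).length = l'.length + 1 := by simp
      rw [hL, List.range_succ, List.filter_append, List.reverse_append, List.foldl_append]
      have hzip : (l' ++ [a]).zipIdx = l'.zipIdx ++ [(a, l'.length)] := by
        simp [List.zipIdx_append]
      by_cases hp : p l'.length
      · rw [List.filter_singleton]
        simp only [hp, cond_true, List.reverse_cons, List.reverse_nil, List.nil_append]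
        have h1 : pvDel (l' ++ [a]) (l'.length : Int) = l' := by
          rw [pvDel_natCast (l' ++ [a]) l'.length (by simp),
              List.eraseIdx_append_of_length_le (le_refl l'.length)]
          simp
        simp only [List.foldl_cons, List.foldl_nil, h1]
        rw [ih, hzip, List.filter_append]
        simp [hp]
      · rw [List.filter_singleton]
        simp only [hp]
        simp only [cond_false, List.reverse_nil, List.foldl_nil]
        rw [pvDelFold_prefix _ [a] l'
            (by
              refine (List.pairwise_reverse).mpr ?_
              exact (List.pairwise_lt_range.filter p).imp (fun h => h)
              )
            (by
              intro d hd
              have := List.mem_range.mp (List.mem_of_mem_filter (List.mem_reverse.mp hd))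
              exact this)]
        rw [ih, hzip, List.filter_append]
        simp [hp]

-- membership in a Set built from a list is list membership
theorem pvSetContains (ys : List (Option String)) (y : Option String) :
    PySem.Set.contains (PySem.Set.ofList ys) y = ys.contains y := by
  apply Bool.eq_iff_iff.mpr
  unfold PySem.Set.contains
  rw [List.contains_iff_mem, List.contains_iff_mem]
  exact PySem.Set.mem_ofList ys y

-- the inner loop of A collects index i0 once iff the first field of record i0 occurs in list_temp2
theorem pv_inner (l1 l2 : List (List String))
    (hpre3 : ∀ r ∈ l1, l2.countP (fun s => s.head? == r.head?) ≤ 1)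
    (i0 : Int) (h0 : 0 ≤ i0) (h1 : i0 < (l1.length : Int)) :
    ((PySem.List.pyRange 0 (PySem.List.len l2) 1).filter (fun j0 =>
        ((PySem.List.pyGet? l1 i0).bind (fun r => PySem.List.pyGet? r 0))
          == ((PySem.List.pyGet? l2 j0).bind (fun r => PySem.List.pyGet? r 0)))).map (fun _ => i0)
    = if (l2.map (fun s => s.head?)).contains ((PySem.List.pyGetD l1 i0 ([] : List String)).head?)
      then [i0] else [] := by
  have hKl1 : PySem.List.pyGet? l1 i0 = some (PySem.List.pyGetD l1 i0 ([] : List String)) := by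
    rw [PySem.List.pyGet?_of_nonneg l1 h0, PySem.List.pyGetD_eq_getElem l1 _ h0 h1]
    exact List.getElem?_eq_getElem (by omega)
  have hfc : (PySem.List.pyRange 0 (PySem.List.len l2) 1).filter (fun j0 =>
        ((PySem.List.pyGet? l1 i0).bind (fun r => PySem.List.pyGet? r 0))
          == ((PySem.List.pyGet? l2 j0).bind (fun r => PySem.List.pyGet? r 0)))
      = (PySem.List.pyRange 0 (PySem.List.len l2) 1).filter (fun j0 =>
          ((PySem.List.pyGetD l1 i0 ([] : List String)).head?
            == (PySem.List.pyGetD l2 j0 ([] : List String)).head?)) := by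
    apply List.filter_congr
    intro j0 hj0
    have hb := PySem.List.mem_pyRange_one.mp hj0
    rw [PySem.List.len_eq] at hb
    have hKl2 : PySem.List.pyGet? l2 j0 = some (PySem.List.pyGetD l2 j0 ([] : List String)) := by
      rw [PySem.List.pyGet?_of_nonneg l2 hb.1, PySem.List.pyGetD_eq_getElem l2 _ hb.1 hb.2]
      exact List.getElem?_eq_getElem (by omega)
    rw [hKl1, hKl2]
    simp [pvKey0]
  rw [hfc, List.map_const']
  have hlen : ((PySem.List.pyRange 0 (PySem.List.len l2) 1).filter (fun j0 =>
          ((PySem.List.pyGetD l1 i0 ([] : List String)).head?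
            == (PySem.List.pyGetD l2 j0 ([] : List String)).head?))).length
      = l2.countP (fun s => (PySem.List.pyGetD l1 i0 ([] : List String)).head? == s.head?) := by
    rw [← List.countP_eq_length_filter]
    have := List.countP_map (p := fun s : List String =>
        (PySem.List.pyGetD l1 i0 ([] : List String)).head? == s.head?)
      (f := fun j0 => PySem.List.pyGetD l2 j0 ([] : List String))
      (l := PySem.List.pyRange 0 (PySem.List.len l2) 1)
    rw [PySem.List.map_pyGetD_pyRange_zero l2 ([] : List String)] at this
    exact this.symm
  rw [hlen]
  have hmemr : PySem.List.pyGetD l1 i0 ([] : List String) ∈ l1 :=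
    PySem.List.pyGetD_mem l1 ([] : List String) ⟨by omega, h1⟩
  have hle : l2.countP (fun s => (PySem.List.pyGetD l1 i0 ([] : List String)).head? == s.head?) ≤ 1 := by
    have h := hpre3 _ hmemr
    have heq : l2.countP (fun s => (PySem.List.pyGetD l1 i0 ([] : List String)).head? == s.head?)
        = l2.countP (fun s => s.head? == (PySem.List.pyGetD l1 i0 ([] : List String)).head?) :=
      List.countP_congr (by intro x _; simp only [beq_iff_eq]; exact eq_comm)
    omega
  by_cases hc : (PySem.List.pyGetD l1 i0 ([] : List String)).head? ∈ l2.map (fun s => s.head?)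
  · obtain ⟨s, hs, hsh⟩ := List.mem_map.mp hc
    have hpos : 0 < l2.countP (fun s => (PySem.List.pyGetD l1 i0 ([] : List String)).head? == s.head?) :=
      List.countP_pos_iff.mpr ⟨s, hs, by simp [hsh]⟩
    have h1' : l2.countP (fun s => (PySem.List.pyGetD l1 i0 ([] : List String)).head? == s.head?) = 1 := by omega
    rw [h1']
    rw [if_pos (by rw [List.contains_iff_mem]; exact hc)]
    rfl
  · have h0' : l2.countP (fun s => (PySem.List.pyGetD l1 i0 ([] : List String)).head? == s.head?) = 0 :=
      List.countP_eq_zero.mpr (by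
        intro s hs hq
        exact hc (List.mem_map.mpr ⟨s, hs, (beq_iff_eq.mp hq).symm⟩))
    rw [h0']
    rw [if_neg (by rw [List.contains_iff_mem]; exact hc)]
    rfl

-- A = B on Pre_
theorem pv_main (l1 l2 : List (List String)) (hpre : Pre_make_subtract l1 l2) :
    make_subtract l1 l2 = make_subtract_alt l1 l2 := by
  obtain ⟨-, -, hpre3⟩ := hpre
  -- A, with its lets zeta-reduced and the deletion body named pvDel (definitional)
  have hA : make_subtract l1 l2
      = (PySem.List.sorted
          ((PySem.List.pyRange 0 (PySem.List.len l1) 1).foldl (fun acc i0 =>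
            (PySem.List.pyRange 0 (PySem.List.len l2) 1).foldl (fun acc2 j0 =>
              if ((PySem.List.pyGet? l1 i0).bind (fun r => PySem.List.pyGet? r 0))
                  == ((PySem.List.pyGet? l2 j0).bind (fun r => PySem.List.pyGet? r 0))
              then acc2 ++ [i0] else acc2) acc) [])
          (fun x => x) true).foldl (fun cur i1 => pvDel cur i1) l1 := by
    have hd : (fun (cur : List (List String)) (i1 : Int) =>
        match PySem.List.pop? cur i1 with
        | some r => r.2
        | none => cur) = fun (cur : List (List String)) (i1 : Int) => pvDel cur i1 := by
      funext cur i1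
      unfold pvDel
      cases PySem.List.pop? cur i1 <;> rfl
    unfold make_subtract
    rw [hd]
  -- the collected index list is the ascending list of matched positions
  have hnum : (PySem.List.pyRange 0 (PySem.List.len l1) 1).foldl (fun acc i0 =>
        (PySem.List.pyRange 0 (PySem.List.len l2) 1).foldl (fun acc2 j0 =>
          if ((PySem.List.pyGet? l1 i0).bind (fun r => PySem.List.pyGet? r 0))
              == ((PySem.List.pyGet? l2 j0).bind (fun r => PySem.List.pyGet? r 0))
          then acc2 ++ [i0] else acc2) acc) []
      = (PySem.List.pyRange 0 (PySem.List.len l1) 1).filter (fun i0 =>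
          (l2.map (fun s => s.head?)).contains
            ((PySem.List.pyGetD l1 i0 ([] : List String)).head?)) := by
    have hcongr := PySem.List.foldl_congr_mem (PySem.List.pyRange 0 (PySem.List.len l1) 1)
      (fun acc i0 =>
        (PySem.List.pyRange 0 (PySem.List.len l2) 1).foldl (fun acc2 j0 =>
          if ((PySem.List.pyGet? l1 i0).bind (fun r => PySem.List.pyGet? r 0))
              == ((PySem.List.pyGet? l2 j0).bind (fun r => PySem.List.pyGet? r 0))
          then acc2 ++ [i0] else acc2) acc)
      (fun acc i0 =>
        if (l2.map (fun s => s.head?)).contains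
            ((PySem.List.pyGetD l1 i0 ([] : List String)).head?)
        then acc ++ [i0] else acc)
      ([] : List Int)
      (by
        intro acc i0 hi0
        have hb := PySem.List.mem_pyRange_one.mp hi0
        rw [PySem.List.len_eq] at hb
        beta_reduce
        rw [PySem.List.foldl_append_if
          (fun j0 => ((PySem.List.pyGet? l1 i0).bind (fun r => PySem.List.pyGet? r 0))
              == ((PySem.List.pyGet? l2 j0).bind (fun r => PySem.List.pyGet? r 0)))
          (fun _ => i0) _ acc]
        rw [pv_inner l1 l2 hpre3 i0 hb.1 hb.2]
        split <;> simp)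
    rw [hcongr, PySem.List.foldl_append_if _ (fun x => x) _ ([] : List Int)]
    simp only [List.map_id_fun', id, List.nil_append]
  -- Nat-ize the filtered range
  have hfilter : (PySem.List.pyRange 0 (PySem.List.len l1) 1).filter (fun i0 =>
          (l2.map (fun s => s.head?)).contains
            ((PySem.List.pyGetD l1 i0 ([] : List String)).head?))
      = ((List.range l1.length).filter (fun (k : Nat) =>
          (l2.map (fun s => s.head?)).contains
            ((PySem.List.pyGetD l1 (k : Int) ([] : List String)).head?))).map (fun (k : Nat) => (k : Int)) := by
    rw [PySem.List.len_eq, PySem.List.pyRange_zero_natCast, List.filter_map]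
    rfl
  rw [hA, hnum, hfilter]
  -- sort(reverse=True) of a strictly ascending list is its reverse
  rw [PySem.List.sorted_rev_eq_of_perm_of_pairwise_gt _
      (((List.range l1.length).filter (fun (k : Nat) =>
          (l2.map (fun s => s.head?)).contains
            ((PySem.List.pyGetD l1 (k : Int) ([] : List String)).head?))).map (fun (k : Nat) => (k : Int))).reverse
      (fun x => x) (List.reverse_perm _)
      (by
        refine List.pairwise_reverse.mpr ?_
        have h := (PySem.List.pairwise_lt_pyRange_one 0 (PySem.List.len l1)).filter (fun i0 =>
          (l2.map (fun s => s.head?)).contains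
            ((PySem.List.pyGetD l1 i0 ([] : List String)).head?))
        rw [hfilter] at h
        exact h)]
  rw [← List.map_reverse, List.foldl_map, pvDelFold_main l1 (fun (k : Nat) =>
      (l2.map (fun s => s.head?)).contains
        ((PySem.List.pyGetD l1 (k : Int) ([] : List String)).head?))]
  -- the index-based predicate is the element-based one on zipIdx
  have hzc : l1.zipIdx.filter (fun z => !((l2.map (fun s => s.head?)).contains
        ((PySem.List.pyGetD l1 (z.2 : Int) ([] : List String)).head?)))
      = l1.zipIdx.filter (fun z => !((l2.map (fun s => s.head?)).contains z.1.head?)) := by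
    apply List.filter_congr
    intro z hz
    obtain ⟨x, i⟩ := z
    obtain ⟨-, hi, hx⟩ := List.mem_zipIdx hz
    simp only [Nat.zero_add] at hi
    have : PySem.List.pyGetD l1 (i : Int) ([] : List String) = x := by
      rw [PySem.List.pyGetD_natCast, List.getD_eq_getElem l1 _ (by omega)]
      simp only [Nat.sub_zero] at hx
      exact hx.symm
    rw [this]
  rw [hzc]
  -- drop the indices
  have hfin : (l1.zipIdx.filter (fun z => !((l2.map (fun s => s.head?)).contains z.1.head?))).map Prod.fst
      = l1.filter (fun x => !((l2.map (fun s => s.head?)).contains x.head?)) := by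
    conv_rhs => rw [← List.zipIdx_map_fst 0 l1, List.filter_map]
    rfl
  rw [hfin]
  -- B, zeta-reduced and with row[0] read as head?
  have hB : make_subtract_alt l1 l2
      = l1.filter (fun x => !((l2.map (fun s => s.head?)).contains x.head?)) := by
    show l1.filter (fun row => !(PySem.Set.contains
        (PySem.Set.ofList (l2.map (fun row => PySem.List.pyGet? row 0)))
        (PySem.List.pyGet? row 0))) = _
    have hmap : l2.map (fun row => PySem.List.pyGet? row 0) = l2.map (fun s => s.head?) :=
      List.map_congr_left (fun s _ => pvKey0 s)
    apply List.filter_congr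
    intro x _
    rw [pvKey0, hmap, pvSetContains]
  rw [hB]

-- ===== VERDICT (by name: the statement is the Claim_ definition above) =====
theorem make_subtract_spec : Claim_equal_make_subtract := by
  intro l1 l2 _ hpre
  exact pv_main l1 l2 hpre
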